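-- pv_equiv track=rewrite | github.com/nonusDev/Algorithm | Programmers/Level1/문자열내마음대로정렬하기.py | solution
-- ===== SOURCE A (Python) =====
-- import operator
--
-- def solution(strings, n):
--     sol = dict()
--     res = []
--     for i in strings:
--         sol[(i[n], i)] = i
--
--     sol = sorted(sol.items(), key=operator.itemgetter(0))
--
--     for i in sol:
--         res.append(i[1])
--
--     return res
-- ===== SOURCE B (Python) =====
-- def solution(strings, n):
--     # Group the distinct strings into buckets by their nth character, then
--     # emit buckets in key order, each bucket sorted lexicographically.
--     buckets = {}
--     for s in set(strings):
--         buckets.setdefault(s[n], []).append(s)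
--     res = []
--     for c in sorted(buckets):
--         res += sorted(buckets[c])
--     return res
-- ===== Notes on version B (the rewrite author's own statement) =====
-- stated objective: alternative
-- what changed: Instead of building a dict keyed by the composite tuple (s[n], s) and sorting its items by that tuple key, B deduplicates with set(strings), groups strings into buckets indexed by their nth character, and concatenates the buckets in sorted key order, each bucket sorted lexicographically.
import Mathlib
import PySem

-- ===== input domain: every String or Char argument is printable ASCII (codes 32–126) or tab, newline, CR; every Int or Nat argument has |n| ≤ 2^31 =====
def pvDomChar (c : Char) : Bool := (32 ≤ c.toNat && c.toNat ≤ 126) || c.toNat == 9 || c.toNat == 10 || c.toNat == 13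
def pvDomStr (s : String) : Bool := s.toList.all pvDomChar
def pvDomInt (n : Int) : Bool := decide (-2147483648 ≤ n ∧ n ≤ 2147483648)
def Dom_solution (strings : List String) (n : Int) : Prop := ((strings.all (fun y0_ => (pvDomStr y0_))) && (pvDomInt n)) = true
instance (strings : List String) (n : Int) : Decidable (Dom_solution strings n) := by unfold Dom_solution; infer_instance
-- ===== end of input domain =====

-- B groups the deduplicated strings into buckets by their nth character and concatenates
-- the buckets in key order (each sorted lexicographically), instead of A's single sort of
-- dict items keyed by the tuple (s[n], s); an alternative decomposition of the same cost.


-- shared primitive: Python's i[n] on a string (total form; Pre_ excludes the IndexError case)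
def pyCharAt (s : String) (n : Int) : Char := (PySem.Str.pyGet? s n).getD ' '

-- ===== PORT A =====
def solution (strings : List String) (n : Int) : List String :=
  let sol : PySem.Dict (Char × String) String :=
    strings.foldl (fun d i => d.insert (pyCharAt i n, i) i) PySem.Dict.empty
  let sol2 := PySem.List.sorted2 sol.items (fun p => p.1.1) (fun p => p.1.2)
  sol2.foldl (fun res i => res ++ [i.2]) []

-- ===== PORT B =====
-- (Source B iterates set(strings) in Python's hash order; the buckets are consumed only through
-- sorted(...), so the result is iteration-order independent and Set.ofList's order is exact.)
def solution_alt (strings : List String) (n : Int) : List String :=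
  let distinct : PySem.Set String := PySem.Set.ofList strings
  let buckets : PySem.Dict Char (List String) :=
    distinct.foldl (fun d s => d.modify (pyCharAt s n) [] (fun b => b ++ [s])) PySem.Dict.empty
  (PySem.List.sorted buckets.keys (fun c => c)).foldl
    (fun res c => res ++ PySem.List.sorted (buckets.getD c []) (fun s => s)) []

-- ===== PRECONDITION & SPEC =====
-- Pre_ excludes exactly the inputs where some string is too short: there Python's i[n] raises IndexError.
def Pre_solution (strings : List String) (n : Int) : Prop :=
  ∀ s ∈ strings, PySem.Raise.InRange s.toList.length n
instance (strings : List String) (n : Int) : Decidable (Pre_solution strings n) := by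
  unfold Pre_solution; infer_instance
def pvWitness_solution : List String × Int := (["ba", "ab", "ab", "b"], 0)

def Spec_solution (strings : List String) (n : Int) (out : List String) : Prop := out = solution_alt strings n
instance (strings : List String) (n : Int) (out : List String) : Decidable (Spec_solution strings n out) := by unfold Spec_solution; infer_instance

-- ===== CLAIM (what is proved, stated in full; the proofs are below) =====
def Claim_equal_solution : Prop := ∀ (strings : List String) (n : Int), Dom_solution strings n → Pre_solution strings n → Spec_solution strings n (solution strings n)

-- ===== LEMMAS AND PROOFS =====


-- A's dict loop: keys (s[n],s) are injective in s, so overwrites never change anything and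
-- the items list is the first-occurrence dedup of strings, tagged with its key.
theorem dictA_items (f : String → Char) (l S : List String) :
    (l.foldl (fun d i => d.insert (f i, i) i)
       (PySem.Dict.mk (S.map (fun s => ((f s, s), s))))).items
    = (PySem.Set.update S l).map (fun s => ((f s, s), s)) := by
  induction l generalizing S with
  | nil => simp [PySem.Set.update]
  | cons i l ih =>
    have hcont : (PySem.Dict.mk (S.map (fun s => ((f s, s), s)))).contains (f i, i)
        = decide (i ∈ S) := by
      simp only [PySem.Dict.contains_mk, List.any_map, Function.comp_def]
      rw [Bool.eq_iff_iff]
      simp only [List.any_eq_true, decide_eq_true_eq, beq_iff_eq, Prod.mk.injEq]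
      constructor
      · rintro ⟨s, hs, ⟨-, h2⟩⟩; exact h2 ▸ hs
      · intro h; exact ⟨i, h, by simp⟩
    by_cases hmem : i ∈ S
    · have : (PySem.Dict.mk (S.map (fun s => ((f s, s), s)))).insert (f i, i) i
          = PySem.Dict.mk (S.map (fun s => ((f s, s), s))) := by
        apply PySem.Dict.ext
        rw [PySem.Dict.items_insert]
        rw [hcont]
        simp only [decide_eq_true_eq, hmem, if_pos]
        show List.map _ (List.map _ S) = _
        rw [List.map_map]
        apply List.map_congr_left
        intro s hs
        by_cases hsi : s = i
        · subst hsi; simp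
        · have : (((f s, s), s).1 == (f i, i)) = false := by
            simp [Prod.ext_iff]; intro _; exact hsi
          simp [Function.comp, this]
      rw [List.foldl_cons, this, ih]
      have : PySem.Set.add S i = S := PySem.Set.add_of_mem hmem
      simp [PySem.Set.update, this]
    · have : (PySem.Dict.mk (S.map (fun s => ((f s, s), s)))).insert (f i, i) i
          = PySem.Dict.mk ((S ++ [i]).map (fun s => ((f s, s), s))) := by
        apply PySem.Dict.ext
        rw [PySem.Dict.items_insert]
        rw [hcont]
        simp [hmem]
      rw [List.foldl_cons, this, ih]
      have : PySem.Set.add S i = S ++ [i] := PySem.Set.add_of_not_mem hmem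
      simp [PySem.Set.update, this]

-- Python's tuple-key sort is the sort by the lexicographic product order.
theorem sorted2_eq_sorted_lex {α κ₁ κ₂ : Type} [LinearOrder κ₁] [LinearOrder κ₂]
    (xs : List α) (k1 : α → κ₁) (k2 : α → κ₂) :
    PySem.List.sorted2 xs k1 k2 = PySem.List.sorted xs (fun a => toLex (k1 a, k2 a)) := by
  have heq : (fun a b : α => decide (k1 a < k1 b) || (!decide (k1 b < k1 a) && decide (k2 a < k2 b)))
      = (fun a b : α => decide (toLex (k1 a, k2 a) < toLex (k1 b, k2 b))) := by
    funext a b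
    rcases lt_trichotomy (k1 a) (k1 b) with h | h | h
    · simp [Prod.Lex.toLex_lt_toLex, h]
    · simp [Prod.Lex.toLex_lt_toLex, h]
    · simp [Prod.Lex.toLex_lt_toLex, h, asymm h, h.ne']
  unfold PySem.List.sorted2 PySem.List.sorted
  simp only [if_neg (by simp : ¬ (false = true)), heq]

-- B's bucket for character c holds exactly the strings of L whose nth character is c.
theorem bucketsD (f : String → Char) (L : List String) (c : Char) :
    (L.foldl (fun d s => d.modify (f s) [] (fun b => b ++ [s])) PySem.Dict.empty).getD c []
    = L.filter (fun s => f s == c) := by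
  have := PySem.Dict.getD_foldl_modify_append (L.map (fun s => (f s, s)))
      (PySem.Dict.empty : PySem.Dict Char (List String)) c
  rw [List.foldl_map] at this
  simp only at this
  rw [this]
  simp only [PySem.Dict.getD_empty, List.nil_append, List.filter_map, List.map_map]
  simp [Function.comp_def]

theorem buckets_keys (f : String → Char) (L : List String) :
    (L.foldl (fun d s => d.modify (f s) [] (fun b => b ++ [s])) PySem.Dict.empty).keys
    = PySem.Set.ofList (L.map f) := by
  rw [PySem.Dict.keys_foldl_modify_key L f [] (fun d s b => b ++ [s]) PySem.Dict.empty]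
  simp [PySem.Dict.keys_empty, PySem.Set.update_nil_left]

theorem solution_spec' (strings : List String) (n : Int) :
    solution strings n = solution_alt strings n := by
  classical
  set f : String → Char := fun s => pyCharAt s n with hf
  set L : List String := PySem.Set.ofList strings with hL
  set K : List Char := PySem.Set.ofList (L.map f) with hK
  set chunk : Char → List String :=
    fun c => PySem.List.sorted (L.filter (fun s => f s == c)) (fun s => s) with hchunk
  set Bout : List String := (PySem.List.sorted K (fun c => c)).flatMap chunk with hBout
  have hndL : L.Nodup := PySem.Set.nodup_ofList strings
  -- B's result is Bout
  have hB : solution_alt strings n = Bout := by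
    unfold solution_alt
    show (PySem.List.sorted (List.foldl (fun d s => d.modify (pyCharAt s n) []
        (fun b => b ++ [s])) PySem.Dict.empty (PySem.Set.ofList strings)).keys (fun c => c)).foldl
      (fun res c => res ++ PySem.List.sorted ((List.foldl (fun d s => d.modify (pyCharAt s n) []
        (fun b => b ++ [s])) PySem.Dict.empty (PySem.Set.ofList strings)).getD c []) (fun s => s)) [] = Bout
    rw [PySem.List.foldl_append_eq_flatMap, List.nil_append, buckets_keys, hBout, hK]
    congr 1
    funext c
    rw [bucketsD]
  -- Bout is pairwise strictly increasing in the lexicographic key (s[n], s)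
  have hlex : Bout.Pairwise (fun a b => toLex (f a, a) < toLex (f b, b)) := by
    rw [hBout, List.pairwise_flatMap]
    constructor
    · intro c _
      have h1 : (chunk c).Pairwise (fun a b : String => a ≤ b) :=
        PySem.List.sorted_pairwise _ (fun s => s)
      have hnd : (chunk c).Nodup := by
        rw [hchunk]
        exact (PySem.List.sorted_perm _ _ _).nodup_iff.mpr (hndL.filter _)
      refine (h1.and hnd).imp_of_mem ?_
      intro a b ha hb hab
      have hfa : f a = c := by
        have := (PySem.List.mem_sorted _ _ _ _).mp (hchunk ▸ ha)
        simpa using (List.mem_filter.mp this).2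
      have hfb : f b = c := by
        have := (PySem.List.mem_sorted _ _ _ _).mp (hchunk ▸ hb)
        simpa using (List.mem_filter.mp this).2
      exact Prod.Lex.toLex_lt_toLex.mpr
        (Or.inr ⟨by rw [hfa, hfb], lt_of_le_of_ne hab.1 hab.2⟩)
    · have h2 : (PySem.List.sorted K (fun c => c)).Pairwise (fun a b : Char => a ≤ b) :=
        PySem.List.sorted_pairwise _ (fun c => c)
      have hndK : (PySem.List.sorted K (fun c => c)).Nodup :=
        (PySem.List.sorted_perm _ _ _).nodup_iff.mpr (PySem.Set.nodup_ofList _)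
      refine (h2.and hndK).imp_of_mem ?_
      intro c c' _ _ hcc x hx y hy
      have hfx : f x = c := by
        have := (PySem.List.mem_sorted _ _ _ _).mp (hchunk ▸ hx)
        simpa using (List.mem_filter.mp this).2
      have hfy : f y = c' := by
        have := (PySem.List.mem_sorted _ _ _ _).mp (hchunk ▸ hy)
        simpa using (List.mem_filter.mp this).2
      exact Prod.Lex.toLex_lt_toLex.mpr
        (Or.inl (by rw [hfx, hfy]; exact lt_of_le_of_ne hcc.1 hcc.2))
  have hndB : Bout.Nodup := by
    refine hlex.imp ?_
    intro a b h heq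
    exact absurd h (heq ▸ lt_irrefl _)
  have hperm : Bout.Perm L := by
    rw [List.perm_ext_iff_of_nodup hndB hndL]
    intro a
    rw [hBout]
    simp only [List.mem_flatMap, PySem.List.mem_sorted, hchunk, List.mem_filter, hK,
      PySem.Set.mem_ofList, List.mem_map, beq_iff_eq]
    constructor
    · rintro ⟨c, _, ha, _⟩; exact ha
    · intro ha; exact ⟨f a, ⟨a, ha, rfl⟩, ha, rfl⟩
  -- A's result is the same sorted arrangement
  have hA : solution strings n = Bout := by
    unfold solution
    show List.foldl (fun res i => res ++ [i.2]) []
      (PySem.List.sorted2 (List.foldl (fun d i => d.insert (pyCharAt i n, i) i)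
        PySem.Dict.empty strings).items (fun p => p.1.1) (fun p => p.1.2)) = Bout
    have hitems := dictA_items (fun i => pyCharAt i n) strings []
    simp only [List.map_nil] at hitems
    rw [show PySem.Dict.mk ([] : List ((Char × String) × String)) = PySem.Dict.empty from rfl]
      at hitems
    rw [hitems]
    rw [PySem.List.foldl_append_singleton_eq_map, List.nil_append]
    have hupd : PySem.Set.update ([] : List String) strings = L := by
      rw [hL]; simp [PySem.Set.update_nil_left]
    rw [hupd, sorted2_eq_sorted_lex]
    have hsort := PySem.List.sorted_eq_of_perm_of_pairwise_lt
        (L.map (fun s => ((f s, s), s)))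
        (Bout.map (fun s => ((f s, s), s)))
        (fun p => toLex (p.1.1, p.1.2))
        (hperm.map _)
        (by rw [List.pairwise_map]; exact hlex)
    rw [hf] at hsort
    rw [hsort, List.map_map]
    simp [Function.comp_def]
  rw [hA, hB]

-- ===== VERDICT (by name: the statement is the Claim_ definition above) =====
theorem solution_spec : Claim_equal_solution := by
  intro strings n _ _
  exact solution_spec' strings n
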